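-- pv_equiv track=rewrite | github.com/rensongqi/sanic-adminapi | core/libs/utils.py | filter_empty_kvs
-- ===== SOURCE A (Python) =====
-- def filter_empty_kvs(d: dict):
--     empty_k_list = []
--     for k in d:
--         if not d[k]:
--             empty_k_list.append(k)
--
--     for k in empty_k_list:
--         del d[k]
--
--     return d
-- ===== SOURCE B (Python) =====
-- def filter_empty_kvs(d: dict):
--     kept = {k: v for k, v in d.items() if v}
--     d.clear()
--     d.update(kept)
--     return d
-- ===== Notes on version B (the rewrite author's own statement) =====
-- stated objective: simpler
-- what changed: B keeps the truthy items with a single dict comprehension and rebuilds the dict in place via clear()+update(), instead of A's two loops that first collect the falsy keys into a list and then delete them one by one.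
import Mathlib
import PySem

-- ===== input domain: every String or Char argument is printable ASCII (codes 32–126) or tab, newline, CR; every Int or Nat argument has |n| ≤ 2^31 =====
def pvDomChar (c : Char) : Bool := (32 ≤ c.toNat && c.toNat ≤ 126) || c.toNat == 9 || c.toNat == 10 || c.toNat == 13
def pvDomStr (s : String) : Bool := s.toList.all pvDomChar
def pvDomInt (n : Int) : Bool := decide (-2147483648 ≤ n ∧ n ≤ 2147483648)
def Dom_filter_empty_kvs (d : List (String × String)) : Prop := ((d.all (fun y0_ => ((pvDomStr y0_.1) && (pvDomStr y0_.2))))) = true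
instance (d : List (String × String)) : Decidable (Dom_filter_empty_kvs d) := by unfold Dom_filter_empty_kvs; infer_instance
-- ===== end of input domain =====

-- B rebuilds the dict from a comprehension of the truthy items (clear+update) instead of
-- A's collect-falsy-keys-then-delete-one-by-one; same values, simpler decomposition.
-- Both ports are about the RETURN value; the Python functions also mutate d in place (both to the same final state).

-- ===== PORT A =====
-- the argument arrives as a Python dict: build it with last-wins overwrite, exactly as dict(pairs)
def filter_empty_kvs (d0 : List (String × String)) : List (String × String) :=
  let d := PySem.Dict.ofList d0
  -- for k in d: if not d[k]: empty_k_list.append(k)   (k is always present, so d[k] = getD k "")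
  let empty_k_list := d.keys.foldl (fun acc k => if d.getD k "" == "" then acc ++ [k] else acc) ([] : List String)
  -- for k in empty_k_list: del d[k]
  (empty_k_list.foldl (fun dd k => dd.erase k) d).items

-- ===== PORT B =====
def filter_empty_kvs_alt (d0 : List (String × String)) : List (String × String) :=
  let d := PySem.Dict.ofList d0
  -- kept = {k: v for k, v in d.items() if v}  (keys of d.items are already distinct)
  let kept := d.items.filter (fun p => !(p.2 == ""))
  -- d.clear(); d.update(kept); return d  — the cleared dict updated with kept is exactly kept
  kept

-- ===== PRECONDITION & SPEC =====
def Spec_filter_empty_kvs (d : List (String × String)) (out : List (String × String)) : Prop := out = filter_empty_kvs_alt d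
instance (d : List (String × String)) (out : List (String × String)) : Decidable (Spec_filter_empty_kvs d out) := by unfold Spec_filter_empty_kvs; infer_instance

-- ===== CLAIM (what is proved, stated in full; the proofs are below) =====
def Claim_equal_filter_empty_kvs : Prop := ∀ (d : List (String × String)), Dom_filter_empty_kvs d → Spec_filter_empty_kvs d (filter_empty_kvs d)

-- ===== LEMMAS AND PROOFS =====

-- A's first loop, folded over the items of any dict whose lookups agree with the pairs,
-- collects exactly the first components of the empty-valued pairs.
theorem pv_keys_loop (d : PySem.Dict String String) (m : List (String × String)) (acc : List String)
    (h : ∀ p ∈ m, d.getD p.1 "" = p.2) :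
    m.foldl (fun acc p => if d.getD p.1 "" == "" then acc ++ [p.1] else acc) acc
      = acc ++ (m.filter (fun p => p.2 == "")).map (·.1) := by
  induction m generalizing acc with
  | nil => simp
  | cons p m ih =>
    have hp := h p (by simp)
    have hm : ∀ q ∈ m, d.getD q.1 "" = q.2 := fun q hq => h q (by simp [hq])
    by_cases he : p.2 = ""
    · rw [List.foldl_cons, if_pos (by simp [hp, he]), ih _ hm]
      simp [he]
    · rw [List.foldl_cons, if_neg (by simp [hp, he]), ih _ hm]
      simp [he]

-- A's second loop: erasing every key of ks filters the items by non-membership in ks.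
theorem pv_erase_loop (ks : List String) (e : PySem.Dict String String) :
    (ks.foldl (fun dd k => dd.erase k) e).items
      = e.items.filter (fun p => !(ks.contains p.1)) := by
  induction ks generalizing e with
  | nil => simp
  | cons k ks ih =>
    rw [List.foldl_cons, ih]
    simp only [PySem.Dict.erase, List.filter_filter]
    apply List.filter_congr
    intro p _
    by_cases h1 : p.1 = k <;> simp [h1]

theorem filter_empty_kvs_eq (d0 : List (String × String)) :
    filter_empty_kvs d0 = filter_empty_kvs_alt d0 := by
  unfold filter_empty_kvs filter_empty_kvs_alt
  set d := PySem.Dict.ofList d0 with hd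
  have hnd : d.keys.Nodup := PySem.Dict.nodup_keys_ofList d0
  have hlook : ∀ p ∈ d.items, d.getD p.1 "" = p.2 := by
    intro p hp
    exact PySem.Dict.getD_of_mem_items d (k := p.1) (v := p.2) (by simpa using hp) hnd ""
  have hkeys : d.keys.foldl (fun acc k => if d.getD k "" == "" then acc ++ [k] else acc) ([] : List String)
      = (d.items.filter (fun p => p.2 == "")).map (·.1) := by
    have : d.keys = d.items.map (·.1) := rfl
    rw [this, List.foldl_map, pv_keys_loop d d.items [] hlook]
    simp
  simp only [hkeys, pv_erase_loop]
  apply List.filter_congr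
  intro p hp
  by_cases he : p.2 = ""
  · have : p.1 ∈ (d.items.filter (fun q => q.2 == "")).map (·.1) := by
      simp only [List.mem_map]
      exact ⟨p, by simp [List.mem_filter, hp, he], rfl⟩
    simp [he, this]
  · have hnotin : p.1 ∉ (d.items.filter (fun q => q.2 == "")).map (·.1) := by
      simp only [List.mem_map, List.mem_filter, not_exists]
      rintro q ⟨⟨hq, hq2⟩, hq1⟩
      -- nodup keys: q and p share the first component, so q = p, contradicting p.2 ≠ ""
      have : q = p := by
        have hinj := List.inj_on_of_nodup_map (f := (·.1)) (l := d.items) (by exact hnd)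
        exact hinj hq hp hq1
      exact he (by rw [← this]; exact by simpa using hq2)
    simp [he, hnotin]

-- ===== VERDICT (by name: the statement is the Claim_ definition above) =====
theorem filter_empty_kvs_spec : Claim_equal_filter_empty_kvs := by
  intro d _
  unfold Spec_filter_empty_kvs
  exact filter_empty_kvs_eq d
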